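-- pv_equiv track=rewrite | github.com/Tzaf-osso/calculator_project | check_input.py | check_follows_numbers
-- ===== SOURCE A (Python) =====
-- def check_follows_numbers(str_exp):
--     """
--     check if there is 2 numbers that follow without math expression
--     for example:
--     6+7*9 2+44/54 --------> wrong
--     6+7*9+2+44/54 --------> good
--     """
--     tmp_str = " ".join((str_exp.split()))
--
--     status = "good"
--     for i in range(len(tmp_str)):
--         if tmp_str[i] == ' ':
--             if tmp_str[i - 1].isdigit() and tmp_str[i + 1].isdigit():
--                 status = "wrong"
--
--     return status
-- ===== SOURCE B (Python) =====
-- def check_follows_numbers(str_exp):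
--     words = str_exp.split()
--     for w1, w2 in zip(words, words[1:]):
--         if w1[-1].isdigit() and w2[0].isdigit():
--             return "wrong"
--     return "good"
-- ===== Notes on version B (the rewrite author's own statement) =====
-- stated objective: simpler
-- what changed: Instead of re-joining the words with spaces and scanning the joined string character by character around every space, B iterates directly over consecutive word pairs of str_exp.split() and checks the digit boundary on each pair, returning early on the first hit.
import Mathlib
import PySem

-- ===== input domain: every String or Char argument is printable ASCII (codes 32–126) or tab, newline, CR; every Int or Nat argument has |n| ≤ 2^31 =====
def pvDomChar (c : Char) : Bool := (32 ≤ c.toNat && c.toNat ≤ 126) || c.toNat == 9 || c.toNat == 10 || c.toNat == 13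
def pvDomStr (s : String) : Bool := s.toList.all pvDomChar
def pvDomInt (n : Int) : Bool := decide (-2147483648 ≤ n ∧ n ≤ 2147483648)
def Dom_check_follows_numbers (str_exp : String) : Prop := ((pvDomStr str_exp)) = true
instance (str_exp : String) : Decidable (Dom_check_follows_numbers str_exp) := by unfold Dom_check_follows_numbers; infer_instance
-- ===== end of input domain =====

-- B replaces A's join-then-scan-characters pass by a direct scan of consecutive word pairs (simpler decomposition).

-- True iff the Python expression `o is a char and o.isdigit()`; `none` is unreachable on A's inputs (A never raises).
def pvDig (o : Option Char) : Bool := o.elim false PySem.Chars.isdigit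

-- ===== PORT A =====
def check_follows_numbers (str_exp : String) : String :=
  -- tmp_str = " ".join(str_exp.split())
  let tmp : List Char := PySem.Chars.join [' '] (PySem.Chars.split₀ str_exp.toList)
  -- status = "good"; for i in range(len(tmp_str)): …
  (PySem.List.pyRange 0 (PySem.List.len tmp) 1).foldl
    (fun status i =>
      if PySem.List.pyGet? tmp i = some ' ' then
        if pvDig (PySem.List.pyGet? tmp (i - 1)) && pvDig (PySem.List.pyGet? tmp (i + 1)) then
          "wrong"
        else status
      else status)
    "good"

-- ===== PORT B =====
-- the `for w1, w2 in zip(words, words[1:])` loop with early return "wrong"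
def pvPairScan : List (List Char) → String
  | w1 :: w2 :: rest =>
      if pvDig (PySem.List.pyGet? w1 (-1)) && pvDig (PySem.List.pyGet? w2 0) then "wrong"
      else pvPairScan (w2 :: rest)
  | _ => "good"

def check_follows_numbers_alt (str_exp : String) : String :=
  pvPairScan (PySem.Chars.split₀ str_exp.toList)

-- ===== PRECONDITION & SPEC =====
def Spec_check_follows_numbers (str_exp : String) (out : String) : Prop := out = check_follows_numbers_alt str_exp
instance (str_exp : String) (out : String) : Decidable (Spec_check_follows_numbers str_exp out) := by unfold Spec_check_follows_numbers; infer_instance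

-- ===== CLAIM (what is proved, stated in full; the proofs are below) =====
def Claim_equal_check_follows_numbers : Prop := ∀ (str_exp : String), Dom_check_follows_numbers str_exp → Spec_check_follows_numbers str_exp (check_follows_numbers str_exp)

-- ===== LEMMAS AND PROOFS =====

-- every word produced by str.split() is nonempty and contains no whitespace character
def pvWords (ws : List (List Char)) : Prop :=
  ∀ w ∈ ws, w ≠ [] ∧ ∀ c ∈ w, PySem.Chars.isspace c = false

lemma pvWords_go (s : List Char) : ∀ (cur : List Char) (acc : List (List Char)),
    (∀ c ∈ cur, PySem.Chars.isspace c = false) →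
    (∀ w ∈ acc, w ≠ [] ∧ ∀ c ∈ w, PySem.Chars.isspace c = false) →
    ∀ w ∈ PySem.Chars.split₀.go s cur acc, w ≠ [] ∧ ∀ c ∈ w, PySem.Chars.isspace c = false := by
  induction s with
  | nil =>
    intro cur acc hcur hacc w hw
    rw [PySem.Chars.split₀.go] at hw
    split at hw
    · exact hacc w (List.mem_reverse.mp hw)
    · rcases List.mem_cons.mp (List.mem_reverse.mp hw) with h | h
      · rename_i hne
        subst h
        refine ⟨by simpa using (by simpa [List.isEmpty_iff] using hne : cur ≠ []), ?_⟩
        intro c hc; exact hcur c (List.mem_reverse.mp hc)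
      · exact hacc w h
  | cons x s ih =>
    intro cur acc hcur hacc w hw
    rw [PySem.Chars.split₀.go] at hw
    split at hw
    · split at hw
      · exact ih [] acc (by simp) hacc w hw
      · rename_i hne
        refine ih [] (cur.reverse :: acc) (by simp) ?_ w hw
        intro v hv
        rcases List.mem_cons.mp hv with h | h
        · subst h
          refine ⟨by simpa using (by simpa [List.isEmpty_iff] using hne : cur ≠ []), ?_⟩
          intro c hc; exact hcur c (List.mem_reverse.mp hc)
        · exact hacc v h
    · rename_i hx
      refine ih (x :: cur) acc ?_ hacc w hw
      intro c hc
      rcases List.mem_cons.mp hc with h | h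
      · subst h; simpa using hx
      · exact hcur c h

lemma split₀_words (s : List Char) : pvWords (PySem.Chars.split₀ s) := by
  intro w hw
  exact pvWords_go s [] [] (by simp) (by simp) w hw

-- A's character condition at index i of the joined string
def pvC (t : List Char) (i : Int) : Bool :=
  (PySem.List.pyGet? t i == some ' ') &&
    (pvDig (PySem.List.pyGet? t (i - 1)) && pvDig (PySem.List.pyGet? t (i + 1)))

lemma foldl_status (c : Int → Bool) (l : List Int) (s : String) :
    l.foldl (fun st i => if c i then "wrong" else st) s =
      if l.any c then "wrong" else s := by
  induction l generalizing s with
  | nil => simp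
  | cons x xs ih => by_cases h : c x = true <;> simp [h, ih]

-- a position whose character is not a space cannot satisfy A's condition
lemma pvNoSpaceC (t : List Char) (k : Nat) (c : Char) (hc : t[k]? = some c)
    (hcs : PySem.Chars.isspace c = false) : pvC t (k : Int) = false := by
  have hcne : c ≠ ' ' := by rintro rfl; exact absurd hcs (by decide)
  simp [pvC, PySem.List.pyGet?_natCast, hc, hcne]

lemma join_getElem?_zero (w : List Char) (rest : List (List Char)) (hw : w ≠ []) :
    (PySem.Chars.join [' '] (w :: rest))[0]? = w[0]? := by
  cases rest with
  | nil => rw [PySem.Chars.join_singleton]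
  | cons b bs =>
    rw [PySem.Chars.join_cons_cons, List.append_assoc]
    exact List.getElem?_append_left (by cases w with | nil => exact absurd rfl hw | cons _ _ => simp)

lemma pvC_at_sep (w1 t' : List Char) (h1 : w1 ≠ []) :
    pvC (w1 ++ ' ' :: t') (w1.length : Int)
      = (pvDig (PySem.List.pyGet? w1 (-1)) && pvDig t'[0]?) := by
  have hL : 1 ≤ w1.length := by cases w1 with | nil => exact absurd rfl h1 | cons _ _ => simp
  have e0 : PySem.List.pyGet? (w1 ++ ' ' :: t') (w1.length : Int) = some ' ' := by
    rw [PySem.List.pyGet?_natCast, List.getElem?_append_right (by omega)]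
    simp
  have e1 : PySem.List.pyGet? (w1 ++ ' ' :: t') ((w1.length : Int) - 1)
      = PySem.List.pyGet? w1 (-1) := by
    rw [show (w1.length : Int) - 1 = ((w1.length - 1 : Nat) : Int) by omega,
      PySem.List.pyGet?_natCast, List.getElem?_append_left (by omega),
      PySem.List.pyGet?_neg_one, List.getLast?_eq_getElem?]
  have e2 : PySem.List.pyGet? (w1 ++ ' ' :: t') ((w1.length : Int) + 1) = t'[0]? := by
    rw [show (w1.length : Int) + 1 = ((w1.length + 1 : Nat) : Int) by omega,
      PySem.List.pyGet?_natCast, List.getElem?_append_right (by omega)]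
    simp
  unfold pvC
  rw [e0, e1, e2]
  simp

lemma pvC_shift (w1 t' : List Char) (m : Nat) (hm : 1 ≤ m) :
    pvC (w1 ++ ' ' :: t') ((w1.length + 1 + m : Nat) : Int) = pvC t' (m : Int) := by
  have e0 : PySem.List.pyGet? (w1 ++ ' ' :: t') ((w1.length + 1 + m : Nat) : Int)
      = PySem.List.pyGet? t' (m : Int) := by
    rw [PySem.List.pyGet?_natCast, PySem.List.pyGet?_natCast,
      List.getElem?_append_right (by omega)]
    have : w1.length + 1 + m - w1.length = m + 1 := by omega
    rw [this, List.getElem?_cons_succ]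
  have e1 : PySem.List.pyGet? (w1 ++ ' ' :: t') (((w1.length + 1 + m : Nat) : Int) - 1)
      = PySem.List.pyGet? t' ((m : Int) - 1) := by
    rw [show ((w1.length + 1 + m : Nat) : Int) - 1 = ((w1.length + m : Nat) : Int) by push_cast; omega,
      show (m : Int) - 1 = ((m - 1 : Nat) : Int) by omega,
      PySem.List.pyGet?_natCast, PySem.List.pyGet?_natCast,
      List.getElem?_append_right (by omega)]
    have : w1.length + m - w1.length = (m - 1) + 1 := by omega
    rw [this, List.getElem?_cons_succ]
  have e2 : PySem.List.pyGet? (w1 ++ ' ' :: t') (((w1.length + 1 + m : Nat) : Int) + 1)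
      = PySem.List.pyGet? t' ((m : Int) + 1) := by
    rw [show ((w1.length + 1 + m : Nat) : Int) + 1 = ((w1.length + 1 + m + 1 : Nat) : Int) by push_cast; omega,
      show (m : Int) + 1 = ((m + 1 : Nat) : Int) by push_cast; omega,
      PySem.List.pyGet?_natCast, PySem.List.pyGet?_natCast,
      List.getElem?_append_right (by omega)]
    have : w1.length + 1 + m + 1 - w1.length = (m + 1) + 1 := by omega
    rw [this, List.getElem?_cons_succ]
  unfold pvC
  rw [e0, e1, e2]

-- the main bridge: scanning the joined string equals scanning consecutive word pairs
lemma pvMain (ws : List (List Char)) (h : pvWords ws) :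
    (if ∃ k < (PySem.Chars.join [' '] ws).length,
        pvC (PySem.Chars.join [' '] ws) (k : Int) = true then "wrong" else "good")
      = pvPairScan ws := by
  induction ws with
  | nil => simp [PySem.Chars.join_nil, pvPairScan]
  | cons w1 tail ih =>
    cases tail with
    | nil =>
      have hne : ¬∃ k < w1.length, pvC w1 (k : Int) = true := by
        rintro ⟨k, hk, hc⟩
        have := pvNoSpaceC w1 k (w1[k]'hk) (List.getElem?_eq_getElem hk)
          ((h w1 (by simp)).2 (w1[k]'hk) (List.getElem_mem hk))
        rw [this] at hc
        exact absurd hc (by simp)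
      rw [PySem.Chars.join_singleton, if_neg hne]
      rfl
    | cons w2 rest =>
      have hw1 := h w1 (by simp)
      have hw2 := h w2 (by simp)
      have hrest : pvWords (w2 :: rest) := fun w hw => h w (List.mem_cons_of_mem _ hw)
      have hL2 : 1 ≤ w2.length := by
        cases w2 with | nil => exact absurd rfl hw2.1 | cons _ _ => simp
      set t' := PySem.Chars.join [' '] (w2 :: rest) with ht'
      have ht : PySem.Chars.join [' '] (w1 :: w2 :: rest) = w1 ++ ' ' :: t' := by
        rw [PySem.Chars.join_cons_cons, List.append_assoc]; rfl
      have h0 : t'[0]? = w2[0]? := join_getElem?_zero w2 rest hw2.1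
      have h0' : t'[0]? = some w2[0] := by rw [h0]; exact List.getElem?_eq_getElem hL2
      have hb2 : pvDig (PySem.List.pyGet? w2 0) = pvDig t'[0]? := by
        rw [PySem.List.pyGet?_zero, h0]
      have tlen : (w1 ++ ' ' :: t').length = w1.length + 1 + t'.length := by simp; omega
      have t'w2 : t'.length = (w1 ++ ' ' :: t').length - w1.length - 1 := by omega
      have E : (∃ k < (w1 ++ ' ' :: t').length, pvC (w1 ++ ' ' :: t') (k : Int) = true)
          ↔ ((pvDig (PySem.List.pyGet? w1 (-1)) && pvDig (PySem.List.pyGet? w2 0)) = true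
             ∨ ∃ m < t'.length, pvC t' (m : Int) = true) := by
        constructor
        · rintro ⟨k, hk, hc⟩
          rcases lt_trichotomy k w1.length with hkL | hkL | hkL
          · exfalso
            have hmem : w1[k]'hkL ∈ w1 := List.getElem_mem hkL
            have hget : (w1 ++ ' ' :: t')[k]? = some (w1[k]'hkL) := by
              rw [List.getElem?_append_left hkL]; exact List.getElem?_eq_getElem hkL
            rw [pvNoSpaceC _ k _ hget (hw1.2 _ hmem)] at hc
            exact absurd hc (by simp)
          · left
            subst hkL
            rw [pvC_at_sep w1 t' hw1.1] at hc
            rw [hb2]; exact hc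
          · by_cases hk1 : k = w1.length + 1
            · exfalso
              subst hk1
              have hget : (w1 ++ ' ' :: t')[w1.length + 1]? = some w2[0] := by
                rw [List.getElem?_append_right (by omega)]
                simpa using h0'
              rw [pvNoSpaceC _ _ _ hget (hw2.2 _ (List.getElem_mem hL2))] at hc
              exact absurd hc (by simp)
            · right
              refine ⟨k - w1.length - 1, by omega, ?_⟩
              have hk2 : k = w1.length + 1 + (k - w1.length - 1) := by omega
              rw [hk2, pvC_shift w1 t' _ (by omega)] at hc
              exact hc
        · rintro (hb | ⟨m, hm, hc⟩)
          · refine ⟨w1.length, by omega, ?_⟩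
            rw [pvC_at_sep w1 t' hw1.1, ← hb2]
            exact hb
          · rcases Nat.eq_zero_or_pos m with rfl | hm1
            · exfalso
              rw [pvNoSpaceC t' 0 _ h0' (hw2.2 _ (List.getElem_mem hL2))] at hc
              exact absurd hc (by simp)
            · refine ⟨w1.length + 1 + m, by omega, ?_⟩
              rw [pvC_shift w1 t' m hm1]
              exact hc
      rw [ht]
      have hps : pvPairScan (w1 :: w2 :: rest)
          = if pvDig (PySem.List.pyGet? w1 (-1)) && pvDig (PySem.List.pyGet? w2 0) then "wrong"
            else pvPairScan (w2 :: rest) := rfl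
      rw [hps, ← ih hrest]
      by_cases hb : (pvDig (PySem.List.pyGet? w1 (-1)) && pvDig (PySem.List.pyGet? w2 0)) = true
      · rw [if_pos (E.mpr (Or.inl hb)), if_pos hb]
      · rw [Bool.not_eq_true] at hb
        rw [hb]
        simp only [Bool.false_eq_true, if_false]
        refine if_congr ?_ rfl rfl
        rw [E, hb]
        simp

-- ===== VERDICT (by name: the statement is the Claim_ definition above) =====
theorem check_follows_numbers_spec : Claim_equal_check_follows_numbers := by
  intro s _hd
  unfold Spec_check_follows_numbers check_follows_numbers check_follows_numbers_alt
  set ws := PySem.Chars.split₀ s.toList with hws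
  set t := PySem.Chars.join [' '] ws with ht
  have h1 : (fun (status : String) (i : Int) =>
      if PySem.List.pyGet? t i = some ' ' then
        if pvDig (PySem.List.pyGet? t (i - 1)) && pvDig (PySem.List.pyGet? t (i + 1)) then "wrong"
        else status
      else status)
      = fun (status : String) (i : Int) => if pvC t i then "wrong" else status := by
    funext st i
    by_cases hsp : PySem.List.pyGet? t i = some ' ' <;> simp [pvC, hsp]
  change (PySem.List.pyRange 0 (PySem.List.len t) 1).foldl
      (fun status i =>
        if PySem.List.pyGet? t i = some ' ' then
          if pvDig (PySem.List.pyGet? t (i - 1)) && pvDig (PySem.List.pyGet? t (i + 1)) then "wrong"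
          else status
        else status) "good" = pvPairScan ws
  rw [h1, foldl_status]
  have h2 : ((PySem.List.pyRange 0 (PySem.List.len t) 1).any (pvC t) = true)
      ↔ (∃ k < t.length, pvC t (k : Int) = true) := by
    rw [List.any_eq_true]
    constructor
    · rintro ⟨i, hi, hci⟩
      have hmem := PySem.List.mem_pyRange_one.mp hi
      rw [PySem.List.len_eq] at hmem
      refine ⟨i.toNat, by omega, ?_⟩
      rwa [Int.toNat_of_nonneg hmem.1]
    · rintro ⟨k, hk, hck⟩
      refine ⟨(k : Int), PySem.List.mem_pyRange_one.mpr ⟨by omega, ?_⟩, hck⟩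
      rw [PySem.List.len_eq]
      omega
  rw [← pvMain ws (split₀_words s.toList)]
  exact if_congr h2 rfl rfl
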